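-- pv_equiv track=rewrite | github.com/evothreat/CodeVault | telegram-auto-price-scraper-bot/bot.py | calculate
-- ===== SOURCE A (Python) =====
-- def calculate(prices, tariff):
--     res = 0
--     for p in prices:
--         if p < 300000:
--             res += tariff[0]
--         elif p < 500000:
--             res += tariff[1]
--         elif p < 800000:
--             res += tariff[2]
--         elif p < 1500000:
--             res += tariff[3]
--         else:
--             res += tariff[4]
--     return res
-- ===== SOURCE B (Python) =====
-- def calculate(prices, tariff):
--     cuts = (300000, 500000, 800000, 1500000)
--     counts = [0, 0, 0, 0, 0]
--     for p in prices:
--         counts[sum(1 for c in cuts if p >= c)] += 1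
--     return sum(c * t for c, t in zip(counts, tariff))
-- ===== Notes on version B (the rewrite author's own statement) =====
-- stated objective: alternative
-- what changed: B classifies each price by counting how many thresholds it reaches, tallies a 5-slot bucket histogram in one pass, and returns the dot product of the histogram with the tariff list, instead of A's per-element if/elif cascade adding tariff entries directly.
import Mathlib
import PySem

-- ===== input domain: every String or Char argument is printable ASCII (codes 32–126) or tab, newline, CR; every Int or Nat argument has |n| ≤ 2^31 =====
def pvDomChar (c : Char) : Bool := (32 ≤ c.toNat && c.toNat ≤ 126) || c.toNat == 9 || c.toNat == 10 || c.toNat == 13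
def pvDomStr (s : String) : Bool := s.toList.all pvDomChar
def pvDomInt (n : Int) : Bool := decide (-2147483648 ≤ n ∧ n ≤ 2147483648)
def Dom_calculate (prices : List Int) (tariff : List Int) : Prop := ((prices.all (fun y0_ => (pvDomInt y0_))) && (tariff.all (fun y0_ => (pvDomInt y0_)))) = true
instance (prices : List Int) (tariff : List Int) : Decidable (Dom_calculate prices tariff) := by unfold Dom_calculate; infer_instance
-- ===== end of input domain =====

-- B replaces A's per-element if/elif cascade by a one-pass bucket histogram dotted with the tariff list (alternative decomposition, same cost).

-- ===== PORT A =====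
-- res += tariff[k]: PySem.List.pyGet? is exact; the .getD 0 default is never reached under Pre_calculate (IndexError excluded there).
def calculate (prices : List Int) (tariff : List Int) : Int :=
  prices.foldl (fun res p =>
    if p < 300000 then res + (PySem.List.pyGet? tariff 0).getD 0
    else if p < 500000 then res + (PySem.List.pyGet? tariff 1).getD 0
    else if p < 800000 then res + (PySem.List.pyGet? tariff 2).getD 0
    else if p < 1500000 then res + (PySem.List.pyGet? tariff 3).getD 0
    else res + (PySem.List.pyGet? tariff 4).getD 0) 0

-- ===== PORT B =====
def pvCuts : List Int := [300000, 500000, 800000, 1500000]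

-- sum(1 for c in cuts if p >= c)
def pvBucket (p : Int) : Nat := pvCuts.countP (fun c => decide (c ≤ p))

def calculate_alt (prices : List Int) (tariff : List Int) : Int :=
  let counts := prices.foldl (fun counts p =>
      counts.set (pvBucket p) (counts.getD (pvBucket p) 0 + 1)) ([0, 0, 0, 0, 0] : List Int)
  (counts.zip tariff).foldl (fun acc ct => acc + ct.1 * ct.2) 0

-- ===== PRECONDITION & SPEC =====
-- Pre_ excludes exactly the inputs on which A raises IndexError: some price's bucket index reaches past the end of tariff.
def Pre_calculate (prices : List Int) (tariff : List Int) : Prop :=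
  ∀ p ∈ prices,
    (if p < 300000 then 0 else if p < 500000 then 1 else if p < 800000 then 2
     else if p < 1500000 then 3 else 4) < tariff.length
instance (prices : List Int) (tariff : List Int) : Decidable (Pre_calculate prices tariff) := by unfold Pre_calculate; infer_instance

def pvWitness_calculate : List Int × List Int := ([100, 350000, 900000, 2000000], [10, 20, 30, 40, 50])

def Spec_calculate (prices : List Int) (tariff : List Int) (out : Int) : Prop := out = calculate_alt prices tariff
instance (prices : List Int) (tariff : List Int) (out : Int) : Decidable (Spec_calculate prices tariff out) := by unfold Spec_calculate; infer_instance

-- ===== CLAIM (what is proved, stated in full; the proofs are below) =====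
def Claim_equal_calculate : Prop := ∀ (prices : List Int) (tariff : List Int), Dom_calculate prices tariff → Pre_calculate prices tariff → Spec_calculate prices tariff (calculate prices tariff)

-- ===== LEMMAS AND PROOFS =====

-- A's loop body, named so rewriting need not go under a lambda binder
def pvStepA (tariff : List Int) (res p : Int) : Int :=
  if p < 300000 then res + (PySem.List.pyGet? tariff 0).getD 0
  else if p < 500000 then res + (PySem.List.pyGet? tariff 1).getD 0
  else if p < 800000 then res + (PySem.List.pyGet? tariff 2).getD 0
  else if p < 1500000 then res + (PySem.List.pyGet? tariff 3).getD 0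
  else res + (PySem.List.pyGet? tariff 4).getD 0

lemma calcA_eq (prices tariff : List Int) :
    calculate prices tariff = prices.foldl (pvStepA tariff) 0 := rfl

-- dot product of counts with tariff, as B's final fold computes it
def pvDot (c t : List Int) : Int := (c.zip t).foldl (fun acc ct => acc + ct.1 * ct.2) 0

lemma pvDot_shift (c t : List Int) (a : Int) :
    (c.zip t).foldl (fun acc ct => acc + ct.1 * ct.2) a = a + pvDot c t := by
  induction c generalizing t a with
  | nil => simp [pvDot]
  | cons x xs ih =>
    cases t with
    | nil => simp [pvDot]
    | cons y ys =>
      simp only [List.zip_cons_cons, List.foldl_cons, pvDot]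
      rw [ih, ih]; ring

lemma pvDot_zeros (t : List Int) : pvDot [0, 0, 0, 0, 0] t = 0 := by
  rcases t with _ | ⟨a, _ | ⟨b, _ | ⟨c, _ | ⟨d, _ | ⟨e, t⟩⟩⟩⟩⟩ <;>
    simp [pvDot, List.zip_cons_cons]

-- incrementing histogram slot i adds tariff[i] to the dot product
lemma pvDot_set (c t : List Int) (i : Nat) (hi : i < c.length) (ht : i < t.length) :
    pvDot (c.set i (c.getD i 0 + 1)) t = pvDot c t + t.getD i 0 := by
  induction c generalizing t i with
  | nil => simp at hi
  | cons x xs ih =>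
    cases t with
    | nil => simp at ht
    | cons y ys =>
      cases i with
      | zero =>
        simp only [List.set_cons_zero, List.getD_cons_zero, pvDot,
          List.zip_cons_cons, List.foldl_cons]
        rw [pvDot_shift, pvDot_shift]; ring
      | succ n =>
        simp only [List.set_cons_succ, List.getD_cons_succ, pvDot,
          List.zip_cons_cons, List.foldl_cons]
        rw [pvDot_shift, pvDot_shift,
          ih ys n (by simpa using hi) (by simpa using ht)]
        ring

-- A's branch cascade reads exactly the tariff entry at index pvBucket p
lemma pvBucket_eq (p : Int) :
    pvBucket p = (if p < 300000 then 0 else if p < 500000 then 1 else if p < 800000 then 2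
      else if p < 1500000 then 3 else 4) := by
  simp only [pvBucket, pvCuts, List.countP_cons, List.countP_nil]
  split_ifs <;> simp_all <;> omega

lemma pvGetKey (tariff : List Int) (i : Int) (hi : 0 ≤ i) :
    (PySem.List.pyGet? tariff i).getD 0 = tariff.getD i.toNat 0 := by
  rw [PySem.List.pyGet?_of_nonneg tariff hi]
  simp [List.getD]

lemma stepA_eq (tariff : List Int) (p : Int) (_h : pvBucket p < tariff.length) (res : Int) :
    pvStepA tariff res p = res + tariff.getD (pvBucket p) 0 := by
  have hb := pvBucket_eq p
  unfold pvStepA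
  split_ifs at hb ⊢ with h1 h2 h3 h4 <;>
    rw [hb, pvGetKey tariff _ (by norm_num)] <;> norm_num <;> rfl

-- bucket index is always below 5
lemma pvBucket_lt_five (p : Int) : pvBucket p < 5 := by
  unfold pvBucket
  exact lt_of_le_of_lt List.countP_le_length (by simp [pvCuts])

lemma foldA_shift (tariff : List Int) (ps : List Int) (a r : Int) :
    ps.foldl (pvStepA tariff) (a + r) = a + ps.foldl (pvStepA tariff) r := by
  induction ps generalizing r with
  | nil => simp
  | cons q qs ih =>
    simp only [List.foldl_cons]
    rw [show pvStepA tariff (a + r) q = a + pvStepA tariff r q by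
      unfold pvStepA; split_ifs <;> ring]
    exact ih _

-- main loop invariant: dot of the histogram after processing ps equals dot before plus A's fold over ps
lemma main_inv (tariff : List Int) (ps : List Int) (counts : List Int) (r : Int)
    (hlen : counts.length = 5)
    (hpre : ∀ p ∈ ps, pvBucket p < tariff.length) :
    pvDot (ps.foldl (fun counts p =>
        counts.set (pvBucket p) (counts.getD (pvBucket p) 0 + 1)) counts) tariff + r
      = pvDot counts tariff + ps.foldl (pvStepA tariff) r := by
  induction ps generalizing counts r with
  | nil => simp
  | cons p ps ih =>
    have hp : pvBucket p < tariff.length := hpre p (by simp)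
    simp only [List.foldl_cons]
    rw [ih _ _ (by simp [hlen]) (fun q hq => hpre q (List.mem_cons_of_mem _ hq))]
    rw [pvDot_set counts tariff _ (by rw [hlen]; exact pvBucket_lt_five p) hp]
    rw [stepA_eq tariff p hp r]
    rw [show r + tariff.getD (pvBucket p) 0 = tariff.getD (pvBucket p) 0 + r by ring]
    rw [foldA_shift]
    ring

-- ===== VERDICT (by name: the statement is the Claim_ definition above) =====
theorem calculate_spec : Claim_equal_calculate := by
  intro prices tariff _ hpre
  unfold Spec_calculate
  have hpre' : ∀ p ∈ prices, pvBucket p < tariff.length := by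
    intro p hp
    rw [pvBucket_eq p]
    exact hpre p hp
  have h := main_inv tariff prices ([0, 0, 0, 0, 0] : List Int) 0 rfl hpre'
  rw [pvDot_zeros, add_zero, zero_add] at h
  have hb : calculate_alt prices tariff
      = pvDot (prices.foldl (fun counts p =>
          counts.set (pvBucket p) (counts.getD (pvBucket p) 0 + 1)) [0, 0, 0, 0, 0]) tariff := rfl
  rw [calcA_eq, hb, h]
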